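-- pv_equiv track=rewrite | github.com/LowLevel01/HackerEarth_solutions | algorithms/employee_rating.py | solve
-- ===== SOURCE A (Python) =====
-- def solve (N, workload):
--     big = 0
--     temp = 0
--     for i in range(N-1):
--         if workload[i] > 6:
--             temp += 1
--         else:
--             if temp > big:
--                 big = temp
--             temp = 0
--     return big
-- ===== SOURCE B (Python) =====
-- def solve(N, workload):
--     # Separator positions among the first N-1 days: days with workload <= 6.
--     seps = [i for i in range(N - 1) if workload[i] <= 6]
--     # Runs of >6 days are exactly the gaps between consecutive boundaries,
--     # with a virtual start boundary at -1; the trailing run (never closed by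
--     # a separator) is not counted, matching A.
--     boundaries = [-1] + seps
--     best = 0
--     for prev, cur in zip(boundaries, boundaries[1:]):
--         best = max(best, cur - prev - 1)
--     return best
-- ===== Notes on version B (the rewrite author's own statement) =====
-- stated objective: alternative
-- what changed: A maintains a running counter and best-so-far in one pass over the elements; B first collects the separator positions (workload <= 6) and then takes the maximum gap between consecutive boundaries (with a virtual -1 start boundary).
import Mathlib
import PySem

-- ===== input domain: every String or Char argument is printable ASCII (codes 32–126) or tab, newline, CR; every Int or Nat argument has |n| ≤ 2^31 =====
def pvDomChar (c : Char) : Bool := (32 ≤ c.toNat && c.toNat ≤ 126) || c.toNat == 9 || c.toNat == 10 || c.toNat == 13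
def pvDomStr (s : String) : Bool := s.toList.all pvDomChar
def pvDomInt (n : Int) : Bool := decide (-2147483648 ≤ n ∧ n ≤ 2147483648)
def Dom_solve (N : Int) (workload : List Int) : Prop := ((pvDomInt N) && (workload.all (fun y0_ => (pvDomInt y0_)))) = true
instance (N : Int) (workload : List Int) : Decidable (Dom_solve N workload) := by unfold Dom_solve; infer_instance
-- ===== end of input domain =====

-- B replaces A's one-pass run counter by a separator-positions list and a maximum-gap scan (alternative decomposition, same cost).


-- ===== PORT A =====
-- workload[i]: indices are 0 ≤ i < N-1; under Pre_solve they are in range, so getD 0 is exact there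
def solve (N : Int) (workload : List Int) : Int :=
  (PySem.List.pyRange 0 (N - 1) 1).foldl
    (fun (p : Int × Int) i =>
      if PySem.List.pyGetD workload i 0 > 6 then (p.1, p.2 + 1)
      else (if p.2 > p.1 then p.2 else p.1, 0))
    (0, 0) |>.1

-- ===== PORT B =====
def solve_alt (N : Int) (workload : List Int) : Int :=
  let seps := (PySem.List.pyRange 0 (N - 1) 1).filter (fun i => PySem.List.pyGetD workload i 0 ≤ 6)
  let boundaries := (-1 : Int) :: seps
  (boundaries.zip boundaries.tail).foldl (fun best p => max best (p.2 - p.1 - 1)) 0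

-- ===== PRECONDITION & SPEC =====
-- Pre_ excludes exactly the inputs where Python A raises IndexError (N-1 exceeds the list length)
def Pre_solve (N : Int) (workload : List Int) : Prop := N ≤ (workload.length : Int) + 1
instance (N : Int) (workload : List Int) : Decidable (Pre_solve N workload) := by unfold Pre_solve; infer_instance
def pvWitness_solve : Int × List Int := (4, [7, 7, 3, 7])
def Spec_solve (N : Int) (workload : List Int) (out : Int) : Prop := out = solve_alt N workload
instance (N : Int) (workload : List Int) (out : Int) : Decidable (Spec_solve N workload out) := by unfold Spec_solve; infer_instance

-- ===== CLAIM (what is proved, stated in full; the proofs are below) =====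
def Claim_equal_solve : Prop := ∀ (N : Int) (workload : List Int), Dom_solve N workload → Pre_solve N workload → Spec_solve N workload (solve N workload)

-- ===== LEMMAS AND PROOFS =====

-- A's loop step, abstracted over the valuation of an index
def stepA (f : Int → Int) (p : Int × Int) (i : Int) : Int × Int :=
  if f i > 6 then (p.1, p.2 + 1) else (if p.2 > p.1 then p.2 else p.1, 0)

def gapMax (bs : List Int) : Int :=
  (bs.zip bs.tail).foldl (fun best p => max best (p.2 - p.1 - 1)) 0

lemma zip_tail_append_singleton (bs : List Int) (x : Int) (h : bs ≠ []) :
    ((bs ++ [x]).zip (bs ++ [x]).tail) = bs.zip bs.tail ++ [(bs.getLast h, x)] := by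
  induction bs with
  | nil => simp at h
  | cons a t ih =>
    cases t with
    | nil => simp [List.getLast]
    | cons b u =>
      have := ih (by simp)
      simp only [List.cons_append, List.zip_cons_cons, List.tail_cons] at *
      rw [this]
      congr 1

lemma gapMax_append (bs : List Int) (x : Int) (h : bs ≠ []) :
    gapMax (bs ++ [x]) = max (gapMax bs) (x - bs.getLast h - 1) := by
  unfold gapMax
  rw [zip_tail_append_singleton bs x h, List.foldl_append]
  simp

-- the invariant: A's (big, temp) vs B's boundaries, over range(0, M)
lemma inv (f : Int → Int) (M : Nat) :
    ((PySem.List.pyRange 0 M 1).foldl (stepA f) (0, 0)).1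
      = gapMax ((-1 : Int) :: (PySem.List.pyRange 0 M 1).filter (fun i => f i ≤ 6))
    ∧ ((PySem.List.pyRange 0 M 1).foldl (stepA f) (0, 0)).2
      = (M : Int) - ((PySem.List.pyRange 0 M 1).filter (fun i => f i ≤ 6)).getLastD (-1) - 1 := by
  induction M with
  | zero => simp [gapMax]
  | succ m ih =>
    have hsplit : PySem.List.pyRange 0 ((m : Int) + 1) 1 = PySem.List.pyRange 0 m 1 ++ [(m : Int)] :=
      PySem.List.pyRange_one_succ_right (by positivity)
    obtain ⟨ih1, ih2⟩ := ih
    have hfil : List.filter (fun i => decide (f i ≤ 6)) [(m : Int)]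
        = if f (m : Int) ≤ 6 then [(m : Int)] else [] := by
      by_cases h : f (m : Int) ≤ 6 <;> simp [List.filter, h]
    push_cast
    rw [hsplit]
    simp only [List.foldl_append, List.filter_append, List.foldl_cons, List.foldl_nil]
    rw [hfil]
    by_cases hc : f (m : Int) > 6
    · rw [if_neg (by omega)]
      simp only [stepA, if_pos hc, List.append_nil]
      refine ⟨ih1, ?_⟩
      rw [ih2]; ring
    · have hle : f (m : Int) ≤ 6 := by omega
      rw [if_pos hle]
      simp only [stepA, if_neg hc]
      constructor
      · have h1 : ((-1 : Int) :: ((PySem.List.pyRange 0 m 1).filter (fun i => decide (f i ≤ 6)) ++ [(m : Int)]))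
            = ((-1 : Int) :: (PySem.List.pyRange 0 m 1).filter (fun i => decide (f i ≤ 6))) ++ [(m : Int)] := by
          simp
        rw [h1, gapMax_append _ _ (by simp)]
        have hlast : (((-1 : Int) :: (PySem.List.pyRange 0 m 1).filter (fun i => decide (f i ≤ 6))).getLast (by simp))
            = ((PySem.List.pyRange 0 m 1).filter (fun i => decide (f i ≤ 6))).getLastD (-1) := by
          cases hE : (PySem.List.pyRange 0 m 1).filter (fun i => decide (f i ≤ 6)) with
          | nil => simp [List.getLast]
          | cons a t => simp [List.getLastD_eq_getLast?, List.getLast?_eq_some_getLast]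
        rw [hlast, ← ih1, ← ih2]
        split_ifs with h <;> omega
      · simp

lemma solve_eq_alt (N : Int) (workload : List Int) : solve N workload = solve_alt N workload := by
  unfold solve solve_alt
  set f : Int → Int := fun i => PySem.List.pyGetD workload i 0 with hf
  by_cases h : N - 1 ≤ 0
  · rw [PySem.List.pyRange_one_eq_nil h]
    simp [gapMax]
  · have hM : N - 1 = ((N - 1).toNat : Int) := by omega
    have := (inv f (N - 1).toNat).1
    rw [hM]
    exact this

-- ===== VERDICT (by name: the statement is the Claim_ definition above) =====
theorem solve_spec : Claim_equal_solve := by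
  intro N workload _ _
  unfold Spec_solve
  exact solve_eq_alt N workload
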